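-- pv_equiv track=rewrite | github.com/dragonghy/agents | services/agents-mcp/tests/test_orchestration_events.py | _parse_sse_frames
-- ===== SOURCE A (Python) =====
-- def _parse_sse_frames(body: str) -> list[dict]:
--     """Parse SSE wire format → list of {id, event, data} dicts.
--
--     Skips comment lines (``: ...``) — those are keep-alives. Each frame
--     is separated by a blank line.
--     """
--     frames: list[dict] = []
--     current: dict[str, str] = {}
--     for raw_line in body.split("\n"):
--         line = raw_line.rstrip("\r")
--         if line == "":
--             if current:
--                 frames.append(current)
--                 current = {}
--             continue
--         if line.startswith(":"):
--             # Comment — skip (keep-alive).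
--             continue
--         if ":" in line:
--             field, _, value = line.partition(":")
--             value = value.lstrip(" ")
--             current[field] = value
--     if current:
--         frames.append(current)
--     return frames
-- ===== SOURCE B (Python) =====
-- def _parse_sse_frames(body: str) -> list[dict]:
--     """Group lines into blank-separated blocks, then parse each block into a dict."""
--     blocks = []
--     cur = []
--     for raw_line in body.split("\n"):
--         line = raw_line.rstrip("\r")
--         if line == "":
--             if cur:
--                 blocks.append(cur)
--                 cur = []
--         else:
--             cur.append(line)
--     if cur:
--         blocks.append(cur)
--     frames = []
--     for block in blocks:
--         d = {}
--         for line in block: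
--             if line.startswith(":"):
--                 continue
--             if ":" in line:
--                 field, _, value = line.partition(":")
--                 d[field] = value.lstrip(" ")
--         if d:
--             frames.append(d)
--     return frames
-- ===== Notes on version B (the rewrite author's own statement) =====
-- stated objective: alternative
-- what changed: B replaces A's single running-accumulator scan (one dict mutated while iterating lines, flushed on blank lines) by a two-pass group-then-parse shape: first group rstripped lines into blank-separated blocks, then parse each block into a dict and keep the non-empty ones.
import Mathlib
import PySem

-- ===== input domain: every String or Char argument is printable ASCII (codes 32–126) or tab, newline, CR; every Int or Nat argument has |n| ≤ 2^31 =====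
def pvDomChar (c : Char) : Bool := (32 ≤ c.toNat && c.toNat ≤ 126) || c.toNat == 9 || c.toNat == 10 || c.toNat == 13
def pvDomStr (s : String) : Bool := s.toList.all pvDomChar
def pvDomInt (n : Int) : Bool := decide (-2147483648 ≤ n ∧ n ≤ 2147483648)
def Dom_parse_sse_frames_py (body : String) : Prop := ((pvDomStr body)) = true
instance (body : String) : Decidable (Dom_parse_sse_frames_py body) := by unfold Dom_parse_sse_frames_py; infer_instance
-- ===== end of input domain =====

-- B parses the same SSE body by first grouping lines into blank-separated blocks and then
-- converting each block to a dict (group-then-parse), instead of A's single running-accumulator scan.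

-- shared line helpers (both Pythons contain the identical expressions):
-- raw_line.rstrip("\r") — hand port, exact: removes all trailing '\r' characters
def pvRstripCR (l : List Char) : List Char := (l.reverse.dropWhile (· == '\r')).reverse
-- value.lstrip(" ") — hand port, exact: removes all leading ' ' characters
def pvLstripSp (l : List Char) : List Char := l.dropWhile (· == ' ')
-- line.partition(":") (first two components) — hand port, exact when ':' ∈ line (the only use site)
def pvPartitionField (l : List Char) : List Char × List Char :=
  (l.takeWhile (· ≠ ':'), (l.dropWhile (· ≠ ':')).drop 1)

-- ===== PORT A =====
-- the for-loop of A: state = (frames, current); final flush at the end of the line list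
def pvGoA : List (List Char) → List (List (String × String)) → PySem.Dict String String →
    List (List (String × String))
  | [], frames, current => if current.items = [] then frames else frames ++ [current.items]
  | raw :: rest, frames, current =>
    let line := pvRstripCR raw
    if line = [] then
      if current.items = [] then pvGoA rest frames current
      else pvGoA rest (frames ++ [current.items]) PySem.Dict.empty
    else if PySem.Chars.startswith line [':'] then pvGoA rest frames current
    else if PySem.Chars.isIn [':'] line then
      let p := pvPartitionField line
      pvGoA rest frames (current.insert (String.ofList p.1) (String.ofList (pvLstripSp p.2)))
    else pvGoA rest frames current

def parse_sse_frames_py (body : String) : List (List (String × String)) :=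
  pvGoA (PySem.Chars.splitOn body.toList ['\n']) [] PySem.Dict.empty

-- ===== PORT B =====
-- first pass: group rstripped lines into blank-separated blocks
def pvGroupB : List (List Char) → List (List Char) → List (List (List Char))
  | [], cur => if cur = [] then [] else [cur]
  | raw :: rest, cur =>
    let line := pvRstripCR raw
    if line = [] then
      if cur = [] then pvGroupB rest cur else cur :: pvGroupB rest []
    else pvGroupB rest (cur ++ [line])

-- second pass, inner loop: one block → dict
def pvPbStep (d : PySem.Dict String String) (line : List Char) : PySem.Dict String String :=
  if PySem.Chars.startswith line [':'] then d
  else if PySem.Chars.isIn [':'] line then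
    let p := pvPartitionField line
    d.insert (String.ofList p.1) (String.ofList (pvLstripSp p.2))
  else d

def pvParseBlock (block : List (List Char)) : PySem.Dict String String :=
  block.foldl pvPbStep PySem.Dict.empty

def parse_sse_frames_py_alt (body : String) : List (List (String × String)) :=
  (pvGroupB (PySem.Chars.splitOn body.toList ['\n']) []).foldl
    (fun frames block =>
      let d := pvParseBlock block
      if d.items = [] then frames else frames ++ [d.items]) []

-- ===== PRECONDITION & SPEC =====
def Spec_parse_sse_frames_py (body : String) (out : List (List (String × String))) : Prop := out = parse_sse_frames_py_alt body
instance (body : String) (out : List (List (String × String))) : Decidable (Spec_parse_sse_frames_py body out) := by unfold Spec_parse_sse_frames_py; infer_instance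

-- ===== CLAIM (what is proved, stated in full; the proofs are below) =====
def Claim_equal_parse_sse_frames_py : Prop := ∀ (body : String), Dom_parse_sse_frames_py body → Spec_parse_sse_frames_py body (parse_sse_frames_py body)

-- ===== LEMMAS AND PROOFS =====

-- B's outer loop, as a function of the block list
def pvFoldFrames (bs : List (List (List Char))) : List (List (String × String)) :=
  bs.foldl (fun frames block =>
    let d := pvParseBlock block
    if d.items = [] then frames else frames ++ [d.items]) []

lemma pvFoldFrames_shift (bs : List (List (List Char))) (frames : List (List (String × String))) :
    bs.foldl (fun fr block =>
      let d := pvParseBlock block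
      if d.items = [] then fr else fr ++ [d.items]) frames = frames ++ pvFoldFrames bs := by
  induction bs generalizing frames with
  | nil => simp [pvFoldFrames]
  | cons b bs ih =>
    simp only [pvFoldFrames, List.foldl_cons]
    rw [ih, ih]
    by_cases h : (pvParseBlock b).items = [] <;> simp [h]

lemma pvParseBlock_append (cur : List (List Char)) (line : List Char) :
    pvParseBlock (cur ++ [line]) = pvPbStep (pvParseBlock cur) line := by
  simp [pvParseBlock, List.foldl_append]

lemma pvDict_eq_empty_of_items_nil (d : PySem.Dict String String) (h : d.items = []) :
    d = PySem.Dict.empty := by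
  apply PySem.Dict.ext
  simp [h, PySem.Dict.empty]

lemma pvGoA_eq (lines : List (List Char)) : ∀ (cur : List (List Char))
    (frames : List (List (String × String))),
    pvGoA lines frames (pvParseBlock cur) = frames ++ pvFoldFrames (pvGroupB lines cur) := by
  induction lines with
  | nil =>
    intro cur frames
    by_cases hc : cur = []
    · subst hc
      simp [pvGoA, pvGroupB, pvParseBlock, pvFoldFrames, PySem.Dict.empty]
    · simp only [pvGoA, pvGroupB, if_neg hc]
      by_cases h : (pvParseBlock cur).items = [] <;> simp [h, pvFoldFrames]
  | cons raw rest ih =>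
    intro cur frames
    by_cases hline : pvRstripCR raw = []
    · by_cases h : (pvParseBlock cur).items = []
      · have hcur : pvParseBlock cur = pvParseBlock [] := by
          simpa [pvParseBlock] using pvDict_eq_empty_of_items_nil _ h
        by_cases hc : cur = []
        · subst hc
          simp only [pvGoA, pvGroupB]
          simp only [hline, if_pos h]
          exact ih [] frames
        · simp only [pvGoA, pvGroupB]
          simp only [hline, if_neg hc, if_pos h]
          rw [hcur, ih [] frames]
          simp only [pvFoldFrames]
          rw [pvFoldFrames_shift]
          rw [← hcur]
          simp [h, pvFoldFrames]
      · have hc : cur ≠ [] := by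
          intro hc; subst hc
          simp [pvParseBlock, PySem.Dict.empty] at h
        simp only [pvGoA, pvGroupB]
        simp only [hline, if_neg hc, if_neg h, if_true]
        rw [show (PySem.Dict.empty : PySem.Dict String String) = pvParseBlock [] from rfl,
          ih [] (frames ++ [(pvParseBlock cur).items])]
        simp only [pvFoldFrames, List.foldl_cons, if_neg h, List.nil_append]
        rw [pvFoldFrames_shift (pvGroupB rest []) [(pvParseBlock cur).items]]
        simp [pvFoldFrames]
    · simp only [pvGoA, pvGroupB]
      simp only [if_neg hline]
      split_ifs with h1 h2
      · rw [show pvParseBlock cur = pvParseBlock (cur ++ [pvRstripCR raw]) from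
          by rw [pvParseBlock_append]; simp [pvPbStep, h1]]
        exact ih _ frames
      · rw [show (pvParseBlock cur).insert (String.ofList (pvPartitionField (pvRstripCR raw)).1)
            (String.ofList (pvLstripSp (pvPartitionField (pvRstripCR raw)).2))
            = pvParseBlock (cur ++ [pvRstripCR raw]) from
          by rw [pvParseBlock_append]; simp [pvPbStep, h1, h2]]
        exact ih _ frames
      · rw [show pvParseBlock cur = pvParseBlock (cur ++ [pvRstripCR raw]) from
          by rw [pvParseBlock_append]; simp [pvPbStep, h1, h2]]
        exact ih _ frames

-- ===== VERDICT (by name: the statement is the Claim_ definition above) =====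
theorem parse_sse_frames_py_spec : Claim_equal_parse_sse_frames_py := by
  intro body _
  unfold Spec_parse_sse_frames_py parse_sse_frames_py parse_sse_frames_py_alt
  rw [show (PySem.Dict.empty : PySem.Dict String String) = pvParseBlock [] from rfl,
    pvGoA_eq]
  simp [pvFoldFrames]
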